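-- pv_equiv track=rewrite | github.com/rtrivedi23/finance-tracker | backend/app/categorizer/normalizer.py | extract_prefix
-- ===== SOURCE A (Python) =====
-- def extract_prefix(text: str) -> str | None:
--     """Extract transaction type prefix: UPI, NEFT, IMPS, ATM, POS, NACH, BBPS, EMI, etc."""
--     if not text:
--         return None
--
--     upper = text.upper().strip()
--
--     prefixes = [
--         "UPI", "NEFT", "IMPS", "RTGS",
--         "ATM", "POS", "NACH", "BBPS",
--         "EMI", "ACH", "ECS", "ENACH",
--         "NETBANKING", "INTERNET BANKING",
--         "MOBILE BANKING", "BILL PAYMENT",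
--         "CHEQUE", "CHQ", "DD",
--     ]
--
--     for prefix in prefixes:
--         if upper.startswith(prefix):
--             return prefix
--
--     return None
-- ===== SOURCE B (Python) =====
-- _PREFIX_SET = frozenset([
--     "UPI", "NEFT", "IMPS", "RTGS",
--     "ATM", "POS", "NACH", "BBPS",
--     "EMI", "ACH", "ECS", "ENACH",
--     "NETBANKING", "INTERNET BANKING",
--     "MOBILE BANKING", "BILL PAYMENT",
--     "CHEQUE", "CHQ", "DD",
-- ])
-- _LENGTHS = (2, 3, 4, 5, 6, 10, 12, 14, 16)  # the distinct prefix lengths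
--
--
-- def extract_prefix(text: str) -> str | None:
--     """Extract transaction type prefix via set membership of length-sliced candidates."""
--     if not text:
--         return None
--     upper = text.upper().strip()
--     candidates = [upper[:n] for n in _LENGTHS]
--     return next((c for c in candidates if c in _PREFIX_SET), None)
-- ===== Notes on version B (the rewrite author's own statement) =====
-- stated objective: alternative
-- what changed: Instead of scanning the 19 prefixes and calling startswith on each, B maps the 9 distinct prefix lengths to length-sliced candidate strings and returns the first candidate found in a frozenset; correct because no listed prefix is a prefix of another.
import Mathlib
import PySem

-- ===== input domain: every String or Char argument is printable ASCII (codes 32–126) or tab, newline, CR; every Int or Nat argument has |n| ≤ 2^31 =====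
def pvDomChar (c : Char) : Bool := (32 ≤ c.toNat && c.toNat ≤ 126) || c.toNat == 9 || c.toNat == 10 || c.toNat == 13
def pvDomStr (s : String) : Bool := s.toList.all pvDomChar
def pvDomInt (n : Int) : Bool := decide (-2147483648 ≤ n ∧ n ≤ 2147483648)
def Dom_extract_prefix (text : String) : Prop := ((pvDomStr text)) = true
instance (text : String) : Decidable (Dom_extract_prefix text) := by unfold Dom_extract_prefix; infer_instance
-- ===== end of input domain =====

-- B replaces A's scan over the 19 prefixes (a startswith test each) by mapping the 9 distinct
-- prefix lengths to length-sliced candidates and returning the first candidate lying in a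
-- frozenset (objective: alternative; same result because no listed prefix is a prefix of another).

-- ===== PORT A =====
def pvAPrefixes : List String :=
  ["UPI", "NEFT", "IMPS", "RTGS",
   "ATM", "POS", "NACH", "BBPS",
   "EMI", "ACH", "ECS", "ENACH",
   "NETBANKING", "INTERNET BANKING",
   "MOBILE BANKING", "BILL PAYMENT",
   "CHEQUE", "CHQ", "DD"]

-- the 'for prefix in prefixes: if upper.startswith(prefix): return prefix' loop
def pvALoop (upper : String) : List String → Option String
  | [] => none
  | p :: rest => if PySem.Str.startswith upper p then some p else pvALoop upper rest

def extract_prefix (text : String) : Option String :=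
  if text = "" then none
  else pvALoop (PySem.Str.strip (PySem.Str.upper text)) pvAPrefixes

-- ===== PORT B =====
def pvBPrefixSet : PySem.Set String :=
  PySem.Set.ofList
    ["UPI", "NEFT", "IMPS", "RTGS",
     "ATM", "POS", "NACH", "BBPS",
     "EMI", "ACH", "ECS", "ENACH",
     "NETBANKING", "INTERNET BANKING",
     "MOBILE BANKING", "BILL PAYMENT",
     "CHEQUE", "CHQ", "DD"]

def pvBLengths : List Int := [2, 3, 4, 5, 6, 10, 12, 14, 16]

-- 'candidates = [upper[:n] for n in _LENGTHS]; next((c for c in candidates if c in _PREFIX_SET), None)'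
def extract_prefix_alt (text : String) : Option String :=
  if text.isEmpty then none
  else
    let upper := PySem.Str.strip (PySem.Str.upper text)
    let candidates := pvBLengths.map (fun n => PySem.Str.slice upper none (some n))
    candidates.find? (fun c => PySem.Set.contains pvBPrefixSet c)

-- ===== PRECONDITION & SPEC =====
def Spec_extract_prefix (text : String) (out : Option String) : Prop := out = extract_prefix_alt text
instance (text : String) (out : Option String) : Decidable (Spec_extract_prefix text out) := by unfold Spec_extract_prefix; infer_instance

-- ===== CLAIM (what is proved, stated in full; the proofs are below) =====
def Claim_equal_extract_prefix : Prop := ∀ (text : String), Dom_extract_prefix text → Spec_extract_prefix text (extract_prefix text)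

-- ===== LEMMAS AND PROOFS =====

-- A's loop: a returned value is a listed prefix of the string
theorem pvALoop_some {u p : String} {ps : List String} (h : pvALoop u ps = some p) :
    p ∈ ps ∧ p.toList <+: u.toList := by
  induction ps with
  | nil => simp [pvALoop] at h
  | cons q rest ih =>
      by_cases hs : PySem.Chars.startswith u.toList q.toList = true
      · simp [pvALoop, hs] at h
        subst h
        exact ⟨List.mem_cons_self .., (PySem.Chars.startswith_iff _ _).mp hs⟩
      · simp [pvALoop, hs] at h
        obtain ⟨h1, h2⟩ := ih h
        exact ⟨List.mem_cons_of_mem _ h1, h2⟩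

-- A's loop: none means no listed string is a prefix
theorem pvALoop_none {u : String} {ps : List String} (h : pvALoop u ps = none) :
    ∀ p ∈ ps, ¬ p.toList <+: u.toList := by
  induction ps with
  | nil => simp
  | cons q rest ih =>
      by_cases hs : PySem.Chars.startswith u.toList q.toList = true
      · simp [pvALoop, hs] at h
      · simp [pvALoop, hs] at h
        intro p hp
        rcases List.mem_cons.mp hp with rfl | hp'
        · exact fun hpre => hs ((PySem.Chars.startswith_iff _ _).mpr hpre)
        · exact ih h p hp'

-- every candidate B tests is a prefix of the string
theorem pvSlice_prefix (u : String) (n : Int) :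
    (PySem.Str.slice u none (some n)).toList <+: u.toList := by
  simp [PySem.List.slice]
  exact List.take_prefix _ _

-- B's candidate search returns only listed prefixes of the string
theorem pvFind_some {u c : String}
    (h : (pvBLengths.map (fun n => PySem.Str.slice u none (some n))).find?
          (fun c => PySem.Set.contains pvBPrefixSet c) = some c) :
    c ∈ pvAPrefixes ∧ c.toList <+: u.toList := by
  have hmem := List.mem_of_find?_eq_some h
  have hp := List.find?_some h
  obtain ⟨n, _, rfl⟩ := List.mem_map.mp hmem
  refine ⟨?_, pvSlice_prefix u n⟩
  have := (PySem.Set.contains_iff _ _).mp hp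
  simpa [pvBPrefixSet, PySem.Set.mem_ofList, pvAPrefixes] using this

-- B's candidate search returning none means no tested slice is a listed prefix
theorem pvFind_none {u : String}
    (h : (pvBLengths.map (fun n => PySem.Str.slice u none (some n))).find?
          (fun c => PySem.Set.contains pvBPrefixSet c) = none) :
    ∀ n ∈ pvBLengths, PySem.Str.slice u none (some n) ∉ pvAPrefixes := by
  intro n hn hmem
  have hc : PySem.Str.slice u none (some n) ∈
      pvBLengths.map (fun m => PySem.Str.slice u none (some m)) :=
    List.mem_map.mpr ⟨n, hn, rfl⟩
  have := List.find?_eq_none.mp h _ hc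
  exact this ((PySem.Set.contains_iff _ _).mpr
    (by simpa [pvBPrefixSet, PySem.Set.mem_ofList, pvAPrefixes] using hmem))

-- no listed prefix is a (string-)prefix of a different listed prefix
theorem pvNoPrefixPair : ∀ p ∈ pvAPrefixes, ∀ q ∈ pvAPrefixes, p.toList <+: q.toList → p = q := by
  decide

-- every listed prefix's length occurs among B's lengths
theorem pvLenMem : ∀ p ∈ pvAPrefixes, ((p.toList.length : Int)) ∈ pvBLengths := by decide

theorem pvCore_eq (u : String) :
    pvALoop u pvAPrefixes =
      (pvBLengths.map (fun n => PySem.Str.slice u none (some n))).find?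
        (fun c => PySem.Set.contains pvBPrefixSet c) := by
  cases ha : pvALoop u pvAPrefixes with
  | none =>
      cases hb : (pvBLengths.map (fun n => PySem.Str.slice u none (some n))).find?
          (fun c => PySem.Set.contains pvBPrefixSet c) with
      | none => rfl
      | some c =>
          obtain ⟨hcmem, hcpre⟩ := pvFind_some hb
          exact absurd hcpre (pvALoop_none ha c hcmem)
  | some p =>
      obtain ⟨hpmem, hppre⟩ := pvALoop_some ha
      cases hb : (pvBLengths.map (fun n => PySem.Str.slice u none (some n))).find?
          (fun c => PySem.Set.contains pvBPrefixSet c) with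
      | none =>
          have hn := pvFind_none hb ((p.toList.length : Int)) (pvLenMem p hpmem)
          have htake : (PySem.Str.slice u none (some (p.toList.length : Int))).toList = p.toList := by
            simp [PySem.List.slice_to_natCast]
            exact (List.prefix_iff_eq_take.mp hppre).symm
          have : PySem.Str.slice u none (some (p.toList.length : Int)) = p :=
            String.toList_inj.mp htake
          rw [this] at hn
          exact absurd hpmem hn
      | some c =>
          obtain ⟨hcmem, hcpre⟩ := pvFind_some hb
          rcases List.prefix_or_prefix_of_prefix hppre hcpre with hpc | hcp
          · exact congrArg some (pvNoPrefixPair p hpmem c hcmem hpc)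
          · exact congrArg some (pvNoPrefixPair c hcmem p hpmem hcp).symm

-- ===== VERDICT (by name: the statement is the Claim_ definition above) =====
theorem extract_prefix_spec : Claim_equal_extract_prefix := by
  intro text _
  unfold Spec_extract_prefix extract_prefix extract_prefix_alt
  by_cases h : text = ""
  · simp [h]
  · simp [h, String.isEmpty_iff, pvCore_eq]
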